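-- pv_equiv track=rewrite | github.com/piyushgoel997/MutationClassification | DataPreprocesssing/ParseData.py | process_element
-- ===== SOURCE A (Python) =====
-- def process_element(element):
--     seen = False
--     out = ""
--     for line in element.split("\n"):
--         if not seen and line.count("Description") > 0:
--             seen = True
--             out += line + "\n"
--         elif line.count("ClinVarSet") > 0 or (line.count("<SequenceLocation") > 0 and line.count("GRCh38") > 0):
--             out += line + "\n"
--     return out
-- ===== SOURCE B (Python) =====
-- def process_element(element):
--     lines = element.split("\n")
--     idx = None
--     for i, line in enumerate(lines):
--         if line.count("Description") > 0:
--             idx = i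
--             break
--     kept = [line + "\n" for i, line in enumerate(lines)
--             if i == idx
--             or line.count("ClinVarSet") > 0
--             or (line.count("<SequenceLocation") > 0 and line.count("GRCh38") > 0)]
--     return "".join(kept)
-- ===== Notes on version B (the rewrite author's own statement) =====
-- stated objective: alternative
-- what changed: Replaces A's single stateful pass carrying a `seen` flag and a growing string accumulator by a two-phase decomposition: first locate the index of the first Description line (with an early break), then keep lines by a pure index/substring predicate in a comprehension and join them.
import Mathlib
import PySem

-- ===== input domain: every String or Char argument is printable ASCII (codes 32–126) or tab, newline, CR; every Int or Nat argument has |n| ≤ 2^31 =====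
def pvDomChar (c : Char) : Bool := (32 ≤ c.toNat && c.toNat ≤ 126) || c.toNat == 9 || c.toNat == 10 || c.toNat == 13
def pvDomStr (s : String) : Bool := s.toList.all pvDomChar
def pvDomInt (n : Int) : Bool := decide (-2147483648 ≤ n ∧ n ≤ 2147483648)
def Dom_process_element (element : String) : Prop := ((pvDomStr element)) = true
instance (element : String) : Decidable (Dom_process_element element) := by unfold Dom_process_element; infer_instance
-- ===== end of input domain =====

-- B replaces A's stateful seen-flag pass by a two-phase decomposition: find the first
-- Description line's index, then filter by a pure predicate and join (alternative, same cost).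


-- shared substring tests ('line.count(sub) > 0' in both Pythons)
def pvD (line : String) : Bool := decide (0 < PySem.Str.count line "Description")
def pvP (line : String) : Bool :=
  decide (0 < PySem.Str.count line "ClinVarSet")
    || (decide (0 < PySem.Str.count line "<SequenceLocation")
        && decide (0 < PySem.Str.count line "GRCh38"))

-- ===== PORT A =====
-- loop body of A's single pass: state = (seen, out)
def pvStepA (st : Bool × String) (line : String) : Bool × String :=
  if !st.1 && pvD line then (true, st.2 ++ line ++ "\n")
  else if pvP line then (st.1, st.2 ++ line ++ "\n")
  else st

def process_element (element : String) : String :=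
  (((PySem.Str.split? element "\n").getD []).foldl pvStepA (false, "")).2

-- ===== PORT B =====
-- phase 1 of B: the for-loop with break finding the first Description line's index
def pvFindDesc (i : Nat) : List String → Option Nat
  | [] => none
  | l :: ls => if pvD l then some i else pvFindDesc (i + 1) ls

-- the comprehension's filter condition
def pvKeep (idx : Option Nat) (i : Nat) (line : String) : Bool :=
  (some i == idx) || pvP line

-- phase 2 of B: the indexed comprehension building the kept lines
def pvKept (idx : Option Nat) (i : Nat) : List String → List String
  | [] => []
  | l :: ls =>
    if pvKeep idx i l then (l ++ "\n") :: pvKept idx (i + 1) ls else pvKept idx (i + 1) ls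

def process_element_alt (element : String) : String :=
  let lines := (PySem.Str.split? element "\n").getD []
  let idx := pvFindDesc 0 lines
  PySem.Str.join "" (pvKept idx 0 lines)

-- ===== PRECONDITION & SPEC =====
def Spec_process_element (element : String) (out : String) : Prop := out = process_element_alt element
instance (element : String) (out : String) : Decidable (Spec_process_element element out) := by unfold Spec_process_element; infer_instance

-- ===== CLAIM (what is proved, stated in full; the proofs are below) =====
def Claim_equal_process_element : Prop := ∀ (element : String), Dom_process_element element → Spec_process_element element (process_element element)

-- ===== LEMMAS AND PROOFS =====

def pvJP (ls : List String) : String :=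
  PySem.Str.join "" ((ls.filter pvP).map (· ++ "\n"))

theorem pvJoin_cons (x : String) (xs : List String) :
    PySem.Str.join "" (x :: xs) = x ++ PySem.Str.join "" xs := by
  apply String.toList_inj.mp
  cases xs <;> simp [PySem.Str.join, PySem.Chars.join, List.intercalate]

theorem pvFindDesc_shift (ls : List String) : ∀ i : Nat,
    pvFindDesc (i + 1) ls = (pvFindDesc i ls).map (· + 1) := by
  induction ls with
  | nil => intro i; simp [pvFindDesc]
  | cons l ls ih =>
    intro i
    by_cases h : pvD l <;> simp [pvFindDesc, h, ih]

theorem pvKeep_shift (idx : Option Nat) (i : Nat) (l : String) :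
    pvKeep (idx.map (· + 1)) (i + 1) l = pvKeep idx i l := by
  cases idx with
  | none => simp [pvKeep]
  | some k =>
    have : (i + 1 == k + 1) = (i == k) := by
      by_cases h : i = k <;> simp [h]
    simp [pvKeep, this]

theorem pvKept_shift (ls : List String) : ∀ (idx : Option Nat) (i : Nat),
    pvKept (idx.map (· + 1)) (i + 1) ls = pvKept idx i ls := by
  induction ls with
  | nil => intro idx i; simp [pvKept]
  | cons l ls ih =>
    intro idx i
    simp only [pvKept, pvKeep_shift, ih]

theorem pvKeep_past {k i : Nat} (h : k < i) (l : String) :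
    pvKeep (some k) i l = pvP l := by
  have : (i == k) = false := by simp; omega
  simp [pvKeep, this]

theorem pvKept_past (ls : List String) : ∀ {k i : Nat}, k < i →
    pvKept (some k) i ls = (ls.filter pvP).map (· ++ "\n") := by
  induction ls with
  | nil => intro k i _; simp [pvKept]
  | cons l ls ih =>
    intro k i hk
    by_cases h : pvP l <;>
      simp [pvKept, pvKeep_past hk, h, ih (Nat.lt_succ_of_lt hk)]

theorem pvFoldA_true (ls : List String) : ∀ acc : String,
    (ls.foldl pvStepA (true, acc)).2 = acc ++ pvJP ls := by
  induction ls with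
  | nil =>
    intro acc
    simp only [List.foldl_nil]
    rw [show pvJP [] = "" from by decide]
    simp
  | cons l ls ih =>
    intro acc
    by_cases h : pvP l
    · have hs : pvStepA (true, acc) l = (true, acc ++ l ++ "\n") := by
        simp [pvStepA, h]
      simp only [List.foldl_cons, hs, ih]
      simp [pvJP, h, pvJoin_cons, String.append_assoc]
    · have hs : pvStepA (true, acc) l = (true, acc) := by
        simp [pvStepA, h]
      simp only [List.foldl_cons, hs, ih]
      simp [pvJP, h]

theorem pvMain (ls : List String) : ∀ acc : String,
    (ls.foldl pvStepA (false, acc)).2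
      = acc ++ PySem.Str.join "" (pvKept (pvFindDesc 0 ls) 0 ls) := by
  induction ls with
  | nil =>
    intro acc
    simp only [List.foldl_nil, pvKept]
    rw [show PySem.Str.join "" [] = "" from by decide]
    simp
  | cons l ls ih =>
    intro acc
    by_cases hd : pvD l
    · -- head is the first Description line
      have hs : pvStepA (false, acc) l = (true, acc ++ l ++ "\n") := by
        simp [pvStepA, hd]
      have hk : pvKeep (some 0) 0 l = true := by simp [pvKeep]
      simp only [List.foldl_cons, hs, pvFoldA_true, pvFindDesc, hd, if_pos,
        pvKept, hk, pvJoin_cons, pvKept_past ls Nat.zero_lt_one]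
      simp [pvJP, String.append_assoc]
    · -- head is not a Description line
      have hfd : pvFindDesc 0 (l :: ls) = (pvFindDesc 0 ls).map (· + 1) := by
        simp [pvFindDesc, hd, pvFindDesc_shift]
      have hkeep : pvKeep ((pvFindDesc 0 ls).map (· + 1)) 0 l = pvP l := by
        have : (some 0 == (pvFindDesc 0 ls).map (· + 1)) = false := by
          cases pvFindDesc 0 ls <;> simp
        simp [pvKeep, this]
      by_cases hp : pvP l
      · have hs : pvStepA (false, acc) l = (false, acc ++ l ++ "\n") := by
          simp [pvStepA, hd, hp]
        simp only [List.foldl_cons, hs, ih, hfd, pvKept, hkeep, hp, if_true,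
          pvJoin_cons, pvKept_shift]
        simp [String.append_assoc]
      · have hs : pvStepA (false, acc) l = (false, acc) := by
          simp [pvStepA, hd, hp]
        simp only [List.foldl_cons, hs, ih, hfd, pvKept, hkeep, hp, pvKept_shift]
        simp

-- ===== VERDICT (by name: the statement is the Claim_ definition above) =====
theorem process_element_spec : Claim_equal_process_element := by
  intro element _
  unfold Spec_process_element process_element process_element_alt
  exact pvMain _ ""
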